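-- pv_equiv track=rewrite | github.com/Arsen1302/Code-copy-detector | TestData/solutions/problem_1274_2.py | solution_1274_2
-- ===== SOURCE A (Python) =====
-- def solution_1274_2(s: str, minJump: int, maxJump: int) -> bool:
--     queue, lo = [0], 0
--     for x in queue:
--         if x == len(s)-1: return True
--         for xx in range(max(lo+1, x+minJump), min(x+maxJump+1, len(s))):
--             if s[xx] == "0": queue.append(xx)
--         lo = max(lo, x + maxJump)
--     return False
-- ===== SOURCE B (Python) =====
-- def solution_1274_2(s: str, minJump: int, maxJump: int) -> bool:
--     # Left-to-right DP over positions instead of a BFS frontier queue: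
--     # position 0 is reachable; position i>0 is reachable iff s[i]=='0' and some
--     # earlier reachable j satisfies j+minJump <= i <= j+maxJump.
--     n = len(s)
--     if n == 0:
--         return False
--     dp = [True]
--     for i in range(1, n):
--         if s[i] == "0":
--             lo = max(0, i - maxJump)
--             hi = min(i - 1, i - minJump)
--             dp.append(any(dp[j] for j in range(lo, hi + 1)))
--         else:
--             dp.append(False)
--     return dp[n - 1]
-- ===== Notes on version B (the rewrite author's own statement) =====
-- stated objective: alternative
-- what changed: Replaces the self-growing BFS frontier queue with its 'lo' scanned-watermark by a left-to-right DP table in which each position checks a clamped window of earlier positions for a reachable one.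
import Mathlib
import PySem

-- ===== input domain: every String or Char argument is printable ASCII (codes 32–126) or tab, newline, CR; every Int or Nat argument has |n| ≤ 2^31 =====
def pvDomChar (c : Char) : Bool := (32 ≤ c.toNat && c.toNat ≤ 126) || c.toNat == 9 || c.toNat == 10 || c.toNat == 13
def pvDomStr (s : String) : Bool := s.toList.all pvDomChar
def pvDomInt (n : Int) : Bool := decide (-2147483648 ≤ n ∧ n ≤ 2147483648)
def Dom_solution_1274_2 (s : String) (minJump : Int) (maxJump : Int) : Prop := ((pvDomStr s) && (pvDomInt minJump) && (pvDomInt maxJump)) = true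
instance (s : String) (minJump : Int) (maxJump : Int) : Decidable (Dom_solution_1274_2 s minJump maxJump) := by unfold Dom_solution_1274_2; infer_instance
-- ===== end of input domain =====

-- B replaces A's self-growing BFS frontier queue (with its `lo` watermark) by a
-- left-to-right DP table over positions (objective: alternative; not faster).


-- ===== PORT A =====
-- A's `for x in queue` iterates by index over a list that grows while it is
-- iterated; ported as a fuel recursion (fuel = len(s)+1 is a totality device
-- only: the queue holds distinct indices of s, so the loop runs at most
-- len(s)+1 times — proved as part of the equivalence proof below).
def pvLoopA (s : String) (minJump maxJump : Int) (q : List Int) (i : Nat) (lo : Int) : Nat → Bool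
  | 0 => false
  | fuel + 1 =>
    match q[i]? with
    | none => false                                   -- the for-loop is exhausted
    | some x =>
      if x = PySem.Str.len s - 1 then true
      else
        -- inner for: s[xx] is always in range here (1 ≤ xx < len s), so getD is exact
        let app := (PySem.List.pyRange (max (lo + 1) (x + minJump)) (min (x + maxJump + 1) (PySem.Str.len s)) 1).filter
          (fun xx => (PySem.Str.pyGet? s xx).getD ' ' == '0')
        pvLoopA s minJump maxJump (q ++ app) (i + 1) (max lo (x + maxJump)) fuel

def solution_1274_2 (s : String) (minJump : Int) (maxJump : Int) : Bool :=
  pvLoopA s minJump maxJump [0] 0 0 (s.toList.length + 1)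

-- ===== PORT B =====
def solution_1274_2_alt (s : String) (minJump : Int) (maxJump : Int) : Bool :=
  let n : Int := PySem.Str.len s
  if n == 0 then false
  else
    let dp := (PySem.List.pyRange 1 n 1).foldl (fun dp i =>
      -- s[i] and dp[j] are always in range here, so getD is exact
      if (PySem.Str.pyGet? s i).getD ' ' == '0' then
        let lo := max 0 (i - maxJump)
        let hi := min (i - 1) (i - minJump)
        dp ++ [(PySem.List.pyRange lo (hi + 1) 1).any (fun j => (PySem.List.pyGet? dp j).getD false)]
      else dp ++ [false]) [true]
    (PySem.List.pyGet? dp (n - 1)).getD false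

-- ===== PRECONDITION & SPEC =====
def Spec_solution_1274_2 (s : String) (minJump : Int) (maxJump : Int) (out : Bool) : Prop := out = solution_1274_2_alt s minJump maxJump
instance (s : String) (minJump : Int) (maxJump : Int) (out : Bool) : Decidable (Spec_solution_1274_2 s minJump maxJump out) := by unfold Spec_solution_1274_2; infer_instance

-- ===== CLAIM (what is proved, stated in full; the proofs are below) =====
def Claim_equal_solution_1274_2 : Prop := ∀ (s : String) (minJump : Int) (maxJump : Int), Dom_solution_1274_2 s minJump maxJump → Spec_solution_1274_2 s minJump maxJump (solution_1274_2 s minJump maxJump)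

-- ===== LEMMAS AND PROOFS =====

-- reference reachability predicate both programs compute: position 0 is reachable;
-- position m ≥ 1 is reachable iff s[m] = '0' and some reachable j < m has
-- j + minJump ≤ m ≤ j + maxJump
def pvC (cs : List Char) (m : Nat) : Bool := cs.getD m ' ' == '0'

def pvReach (cs : List Char) (mi ma : Int) (m : Nat) : Bool :=
  if m = 0 then true
  else pvC cs m && ((List.range m).attach.any fun j =>
    pvReach cs mi ma j.1 && decide ((j.1 : Int) + mi ≤ (m : Int)) && decide ((m : Int) ≤ (j.1 : Int) + ma))
termination_by m
decreasing_by exact List.mem_range.mp j.2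

lemma pvReach_zero (cs : List Char) (mi ma : Int) : pvReach cs mi ma 0 = true := by
  rw [pvReach]; simp

lemma pvReach_iff (cs : List Char) (mi ma : Int) (m : Nat) (hm : m ≠ 0) :
    pvReach cs mi ma m = true ↔
      (pvC cs m = true ∧ ∃ j : Nat, j < m ∧ pvReach cs mi ma j = true ∧
        (j : Int) + mi ≤ (m : Int) ∧ (m : Int) ≤ (j : Int) + ma) := by
  rw [pvReach]
  simp [hm, List.any_eq_true, List.mem_attach, Subtype.exists, List.mem_range]
  tauto

lemma pvC_lt (cs : List Char) (m : Nat) (h : pvC cs m = true) : m < cs.length := by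
  by_contra hb
  unfold pvC at h
  rw [List.getD_eq_default] at h
  · simp at h
  · omega

lemma pvReach_pvC (cs : List Char) (mi ma : Int) (m : Nat) (hm : m ≠ 0)
    (h : pvReach cs mi ma m = true) : pvC cs m = true :=
  ((pvReach_iff cs mi ma m hm).mp h).1

-- the character test both ports perform, reduced to pvC
lemma pvPred_eq (s : String) (j : Nat) :
    ((PySem.Str.pyGet? s ((j:Nat) : Int)).getD ' ' == '0') = pvC s.toList j := by
  rw [PySem.Str.pyGet?_natCast]
  unfold pvC
  rw [List.getD_eq_getElem?_getD]

-- ---- B side: the dp table is the table of pvReach values ----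

lemma pvStep_eq (s : String) (mi ma : Int) (k : Nat) (dp : List Bool)
    (hdp : dp = (List.range (k+1)).map (pvReach s.toList mi ma)) :
    (if (PySem.Str.pyGet? s (1 + (k:Int))).getD ' ' == '0' then
        dp ++ [(PySem.List.pyRange (max 0 ((1 + (k:Int)) - ma)) ((min ((1 + (k:Int)) - 1) ((1 + (k:Int)) - mi)) + 1) 1).any
          (fun j => (PySem.List.pyGet? dp j).getD false)]
      else dp ++ [false])
    = (List.range (k+2)).map (pvReach s.toList mi ma) := by
  have hcast : (1 + (k:Int)) = ((k+1 : Nat) : Int) := by push_cast; ring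
  have hcond : ((PySem.Str.pyGet? s (1 + (k:Int))).getD ' ' == '0') = pvC s.toList (k+1) := by
    rw [hcast, PySem.Str.pyGet?_natCast]
    unfold pvC
    rw [List.getD_eq_getElem?_getD]
  have hlen : dp.length = k + 1 := by simp [hdp]
  have hget : ∀ j : Nat, j < k + 1 → (PySem.List.pyGet? dp (j:Int)).getD false = pvReach s.toList mi ma j := by
    intro j hj
    rw [PySem.List.pyGet?_natCast, hdp]
    simp [hj]
  rw [List.range_succ (n := k+1), List.map_append, hcond]
  by_cases hc : pvC s.toList (k+1) = true
  · have hany : ((PySem.List.pyRange (max 0 ((1 + (k:Int)) - ma)) ((min ((k:Int)) ((1 + (k:Int)) - mi)) + 1) 1).any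
          (fun j => (PySem.List.pyGet? dp j).getD false)) = pvReach s.toList mi ma (k+1) := by
      rw [Bool.eq_iff_iff, List.any_eq_true]
      constructor
      · rintro ⟨j, hjm, hjv⟩
        rw [PySem.List.mem_pyRange_one] at hjm
        have hj0 : 0 ≤ j := le_trans (le_max_left _ _) hjm.1
        have hjk : j.toNat < k + 1 := by omega
        have hje : j = ((j.toNat : Nat) : Int) := by omega
        rw [hje, hget j.toNat hjk] at hjv
        rw [pvReach_iff _ _ _ _ (by omega)]
        exact ⟨hc, j.toNat, by omega, hjv, by omega, by omega⟩
      · intro hr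
        rw [pvReach_iff _ _ _ _ (by omega)] at hr
        obtain ⟨-, j, hjlt, hjv, h1, h2⟩ := hr
        refine ⟨(j:Int), ?_, ?_⟩
        · rw [PySem.List.mem_pyRange_one]; omega
        · rw [hget j hjlt]; exact hjv
    simp [hc]
    exact ⟨hdp, hany⟩
  · have hf : pvReach s.toList mi ma (k+1) = false := by
      by_contra hb
      exact hc (pvReach_pvC _ _ _ _ (by omega) (by simpa using hb))
    simp [hc, hf]
    exact hdp

lemma pvDpFold (s : String) (mi ma : Int) (k : Nat) :
    (PySem.List.pyRange 1 (1 + (k:Int)) 1).foldl (fun dp i =>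
      if (PySem.Str.pyGet? s i).getD ' ' == '0' then
        dp ++ [(PySem.List.pyRange (max 0 (i - ma)) ((min (i - 1) (i - mi)) + 1) 1).any
          (fun j => (PySem.List.pyGet? dp j).getD false)]
      else dp ++ [false]) [true]
    = (List.range (k+1)).map (pvReach s.toList mi ma) := by
  induction k with
  | zero =>
    rw [PySem.List.pyRange_one_eq_nil (by omega)]
    simp [pvReach]
  | succ k ih =>
    have hsplit : PySem.List.pyRange 1 (1 + ((k+1 : Nat) : Int)) 1
        = PySem.List.pyRange 1 (1 + (k:Int)) 1 ++ [1 + (k:Int)] := by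
      have : (1 + ((k+1 : Nat) : Int)) = (1 + (k:Int)) + 1 := by push_cast; ring
      rw [this, PySem.List.pyRange_one_succ_right (by omega)]
    rw [hsplit, List.foldl_append, ih]
    have := pvStep_eq s mi ma k ((List.range (k+1)).map (pvReach s.toList mi ma)) rfl
    simpa using this

lemma pvAlt_eq (s : String) (mi ma : Int) :
    solution_1274_2_alt s mi ma =
      if s.toList.length = 0 then false else pvReach s.toList mi ma (s.toList.length - 1) := by
  unfold solution_1274_2_alt
  rw [PySem.Str.len_eq]
  by_cases h0 : s.toList.length = 0
  · simp [h0]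
  · have hne : ¬ (((s.toList.length : Int)) == 0) = true := by simpa using h0
    simp only [hne, if_false, h0]
    have hk : (s.toList.length : Int) = 1 + ((s.toList.length - 1 : Nat) : Int) := by omega
    rw [hk, pvDpFold]
    have hcast : 1 + ((s.toList.length - 1 : Nat) : Int) - 1 = ((s.toList.length - 1 : Nat) : Int) := by ring
    rw [hcast, PySem.List.pyGet?_natCast]
    simp

-- ---- A side: the frontier queue enumerates exactly the pvReach-true positions ----

-- loop invariant of A's queue/watermark loop: the queue is a strictly increasing
-- list of reachable positions of s containing 0, every element is ≤ lo, lo is 0 or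
-- comes from a processed element, every reachable position coverable from a
-- processed element is already queued, and no processed element is len(s)-1
def pvInvA (cs : List Char) (mi ma : Int) (q : List Int) (i : Nat) (lo : Int) : Prop :=
  q.Pairwise (· < ·) ∧
  (0:Int) ∈ q ∧
  (∀ e ∈ q, 0 ≤ e ∧ e < (cs.length : Int)) ∧
  (∀ e ∈ q, pvReach cs mi ma e.toNat = true) ∧
  (∀ e ∈ q, e ≤ lo) ∧
  (lo = 0 ∨ ∃ k, ∃ _ : k < q.length, k < i ∧ lo = q[k] + ma) ∧
  (∀ m : Nat, 1 ≤ m → pvReach cs mi ma m = true →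
     (∃ k, ∃ _ : k < q.length, k < i ∧ q[k] + mi ≤ (m:Int) ∧ (m:Int) ≤ q[k] + ma) → ((m:Int) ∈ q)) ∧
  (∀ k, ∀ _ : k < q.length, k < i → q[k] ≠ (cs.length : Int) - 1) ∧
  i ≤ q.length

lemma pvQlen_le (q : List Int) (n : Nat) (hp : q.Pairwise (· < ·))
    (hb : ∀ e ∈ q, 0 ≤ e ∧ e < (n : Int)) : q.length ≤ n := by
  have hp' : (q.map Int.toNat).Pairwise (· < ·) := by
    rw [List.pairwise_map]
    refine hp.imp_of_mem ?_
    intro a b ha hb' hlt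
    have := hb a ha
    have := hb b hb'
    omega
  have hnd : (q.map Int.toNat).Nodup := hp'.imp (fun h => Nat.ne_of_lt h)
  have hsub : (q.map Int.toNat) ⊆ List.range n := by
    intro x hx
    rw [List.mem_map] at hx
    obtain ⟨e, he, rfl⟩ := hx
    have := hb e he
    rw [List.mem_range]
    omega
  have := (hnd.subperm hsub).length_le
  simpa using this

lemma pvComplete (cs : List Char) (mi ma : Int) (q : List Int) (lo : Int)
    (hinv : pvInvA cs mi ma q q.length lo) :
    ∀ m : Nat, pvReach cs mi ma m = true → (m:Int) ∈ q := by
  obtain ⟨hP, h0, hB, hR, hLo, hLoEq, hCompl, hNe, hIle⟩ := hinv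
  intro m
  induction m using Nat.strong_induction_on with
  | _ m ih =>
    intro hm
    rcases Nat.eq_zero_or_pos m with rfl | hm1
    · simpa using h0
    · have hm' := hm
      rw [pvReach_iff _ _ _ _ (by omega)] at hm'
      obtain ⟨-, j, hjm, hjr, hw1, hw2⟩ := hm'
      have hjq : (j:Int) ∈ q := ih j hjm hjr
      obtain ⟨k, hk, hkq⟩ := List.mem_iff_getElem.mp hjq
      exact hCompl m hm1 hm ⟨k, hk, hk, by rw [hkq]; omega⟩

lemma pvInvA_step (s : String) (mi ma : Int) (q : List Int) (i : Nat) (lo x : Int)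
    (hn : 1 ≤ s.toList.length)
    (hinv : pvInvA s.toList mi ma q i lo)
    (hx : q[i]? = some x)
    (hxe : x ≠ (s.toList.length : Int) - 1) :
    pvInvA s.toList mi ma
      (q ++ (PySem.List.pyRange (max (lo + 1) (x + mi)) (min (x + ma + 1) ((s.toList.length : Int))) 1).filter
        (fun xx => (PySem.Str.pyGet? s xx).getD ' ' == '0'))
      (i + 1) (max lo (x + ma)) := by
  obtain ⟨hP, h0, hB, hR, hLo, hLoEq, hCompl, hNe, hIle⟩ := hinv
  set n : Nat := s.toList.length with hnn
  set app := (PySem.List.pyRange (max (lo + 1) (x + mi)) (min (x + ma + 1) ((n : Nat) : Int)) 1).filter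
      (fun xx => (PySem.Str.pyGet? s xx).getD ' ' == '0') with happdef
  obtain ⟨hilen, hxi⟩ := List.getElem?_eq_some_iff.mp hx
  have hxq : x ∈ q := hxi ▸ List.getElem_mem hilen
  have hlo0 : (0:Int) ≤ lo := hLo 0 h0
  have hxlo : x ≤ lo := hLo x hxq
  have hxb := hB x hxq
  -- membership characterization of the appended block
  have happ : ∀ y ∈ app, (max (lo + 1) (x + mi) ≤ y ∧ y < min (x + ma + 1) ((n:Nat) : Int)) ∧ pvC s.toList y.toNat = true := by
    intro y hy
    rw [happdef, List.mem_filter, PySem.List.mem_pyRange_one] at hy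
    refine ⟨hy.1, ?_⟩
    have hy1 : (0:Int) ≤ y := by have := hy.1.1; omega
    have := hy.2
    rwa [show y = ((y.toNat : Nat) : Int) by omega, pvPred_eq] at this
  have happP : app.Pairwise (· < ·) := by
    rw [happdef]
    exact (PySem.List.pairwise_lt_pyRange_one _ _).sublist List.filter_sublist
  have hmemapp : ∀ m : Nat, 1 ≤ m → pvReach s.toList mi ma m = true →
      lo < (m:Int) → x + mi ≤ (m:Int) → (m:Int) ≤ x + ma → (m:Int) ∈ app := by
    intro m hm1 hmr hml hw1 hw2
    have hpc : pvC s.toList m = true := pvReach_pvC _ _ _ _ (by omega) hmr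
    have hmn : m < n := pvC_lt _ _ hpc
    rw [happdef, List.mem_filter, PySem.List.mem_pyRange_one]
    constructor
    · omega
    · rw [pvPred_eq]; exact hpc
  refine ⟨?_, ?_, ?_, ?_, ?_, ?_, ?_, ?_, ?_⟩
  · rw [List.pairwise_append]
    refine ⟨hP, happP, ?_⟩
    intro a ha b hb'
    have h1 := hLo a ha
    have h2 := (happ b hb').1.1
    omega
  · exact List.mem_append_left _ h0
  · intro e he
    rcases List.mem_append.mp he with he | he
    · exact hB e he
    · have := (happ e he).1
      omega
  · intro e he
    rcases List.mem_append.mp he with he | he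
    · exact hR e he
    · obtain ⟨⟨hel, heu⟩, hec⟩ := happ e he
      rw [pvReach_iff _ _ _ _ (by omega)]
      refine ⟨hec, x.toNat, by omega, hR x hxq, by omega, by omega⟩
  · intro e he
    rcases List.mem_append.mp he with he | he
    · have := hLo e he; omega
    · have := (happ e he).1; omega
  · rcases le_or_gt lo (x + ma) with hcm | hcm
    · right
      refine ⟨i, by rw [List.length_append]; omega, by omega, ?_⟩
      rw [List.getElem_append_left hilen, hxi]
      omega
    · rcases hLoEq with h | ⟨k, hk, hki, hkeq⟩
      · left; omega
      · right
        refine ⟨k, by rw [List.length_append]; omega, by omega, ?_⟩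
        rw [List.getElem_append_left hk]
        omega
  · intro m hm1 hmr ⟨k, hk, hki1, hw1, hw2⟩
    rcases Nat.lt_or_ge k i with hki | hki
    · have hkq : k < q.length := by omega
      rw [List.getElem_append_left hkq] at hw1 hw2
      exact List.mem_append_left _ (hCompl m hm1 hmr ⟨k, hkq, hki, hw1, hw2⟩)
    · have hkeq : k = i := by omega
      subst hkeq
      rw [List.getElem_append_left hilen, hxi] at hw1 hw2
      rcases le_or_gt (m:Int) lo with hml | hml
      · rcases hLoEq with h | ⟨k', hk', hki', hkeq'⟩
        · omega
        · have hlt : q[k'] < q[k] := List.pairwise_iff_getElem.mp hP k' k hk' hilen hki'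
          rw [hxi] at hlt
          refine List.mem_append_left _ (hCompl m hm1 hmr ⟨k', hk', hki', by omega, by omega⟩)
      · exact List.mem_append_right _ (hmemapp m hm1 hmr hml hw1 hw2)
  · intro k hk hki1
    rcases Nat.lt_or_ge k i with hki | hki
    · have hkq : k < q.length := by omega
      rw [List.getElem_append_left hkq]
      exact hNe k hkq hki
    · have hkeq : k = i := by omega
      subst hkeq
      rw [List.getElem_append_left hilen, hxi]
      exact hxe
  · rw [List.length_append]; omega

lemma pvLoopA_eq (s : String) (mi ma : Int) (hn : 1 ≤ s.toList.length) :
    ∀ (fuel : Nat) (q : List Int) (i : Nat) (lo : Int),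
      pvInvA s.toList mi ma q i lo → s.toList.length + 1 ≤ fuel + i →
      pvLoopA s mi ma q i lo fuel = pvReach s.toList mi ma (s.toList.length - 1) := by
  intro fuel
  induction fuel with
  | zero =>
    intro q i lo hinv hfu
    have hql := pvQlen_le q s.toList.length hinv.1 hinv.2.2.1
    have : i ≤ q.length := hinv.2.2.2.2.2.2.2.2
    omega
  | succ fuel ih =>
    intro q i lo hinv hfu
    rw [pvLoopA]
    cases hx : q[i]? with
    | none =>
      have hlen : q.length ≤ i := List.getElem?_eq_none_iff.mp hx
      have hieq : i = q.length := le_antisymm hinv.2.2.2.2.2.2.2.2 hlen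
      subst hieq
      cases hr : pvReach s.toList mi ma (s.toList.length - 1) with
      | false => rfl
      | true =>
        exfalso
        have hmem := pvComplete s.toList mi ma q lo hinv _ hr
        obtain ⟨k, hk, hkq⟩ := List.mem_iff_getElem.mp hmem
        exact hinv.2.2.2.2.2.2.2.1 k hk hk (by rw [hkq]; omega)
    | some x =>
      obtain ⟨hilen, hxi⟩ := List.getElem?_eq_some_iff.mp hx
      have hxq : x ∈ q := hxi ▸ List.getElem_mem hilen
      simp only [PySem.Str.len_eq]
      by_cases hxe : x = (s.toList.length : Int) - 1
      · simp only [hxe, if_true]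
        have hb := hinv.2.2.1 x hxq
        have := hinv.2.2.2.1 x hxq
        rw [show s.toList.length - 1 = x.toNat by omega]
        exact this.symm
      · simp only [hxe, if_false]
        have hstep := pvInvA_step s mi ma q i lo x hn hinv hx hxe
        exact ih _ _ _ hstep (by omega)

lemma pvA_eq (s : String) (mi ma : Int) :
    solution_1274_2 s mi ma =
      if s.toList.length = 0 then false else pvReach s.toList mi ma (s.toList.length - 1) := by
  unfold solution_1274_2
  by_cases h0 : s.toList.length = 0
  · simp only [h0, if_true]
    rw [pvLoopA]
    simp only [List.getElem?_cons_zero]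
    rw [if_neg (by rw [PySem.Str.len_eq, h0]; omega)]
    have hnil : PySem.List.pyRange (max (0 + 1) (0 + mi)) (min (0 + ma + 1) (PySem.Str.len s)) 1 = [] := by
      apply PySem.List.pyRange_one_eq_nil
      rw [PySem.Str.len_eq, h0]
      simp
    rw [hnil]
    simp [pvLoopA]
  · rw [if_neg h0]
    apply pvLoopA_eq s mi ma (by omega)
    · refine ⟨List.pairwise_singleton _ _, List.mem_singleton_self 0, ?_, ?_, ?_, Or.inl rfl, ?_, ?_, by simp⟩
      · intro e he; rw [List.mem_singleton] at he; subst he; constructor <;> omega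
      · intro e he; rw [List.mem_singleton] at he; subst he; simpa using pvReach_zero s.toList mi ma
      · intro e he; rw [List.mem_singleton] at he; omega
      · intro m _ _ hex; obtain ⟨k, _, hk0, _⟩ := hex; omega
      · intro k _ hk0; omega
    · omega

-- ===== VERDICT (by name: the statement is the Claim_ definition above) =====
theorem solution_1274_2_spec : Claim_equal_solution_1274_2 := by
  intro s minJump maxJump _
  unfold Spec_solution_1274_2
  rw [pvA_eq, pvAlt_eq]
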